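-- pv_equiv track=rewrite | github.com/grupy-sanca/dojos | 056/ex1.py | valor_da_mul
-- ===== SOURCE A (Python) =====
-- def valor_da_mul(string):
--     numeros = extrai_numeros(string)
--     if len(numeros) == 0:
--         return None
--     resultado = 1
--     for valor in numeros:
--         resultado *= valor
--     return resultado
--
-- def extrai_numeros(string):
--     numeros = []
--     atual = ""
--     for caracter in string:
--         if caracter.isnumeric():
--             atual += caracter
--         else:
--             if atual != "":
--                 numeros.append(int(atual))
--             atual = ""
--     if atual != "":
--         numeros.append(int(atual))
--     return numeros
-- ===== SOURCE B (Python) =====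
-- def valor_da_mul(string):
--     # Single cursor scan: consume each digit run in place, fold the product
--     # into an Option-style accumulator directly (no intermediate list).
--     prod = None
--     i, n = 0, len(string)
--     while i < n:
--         if string[i].isnumeric():
--             j = i + 1
--             while j < n and string[j].isnumeric():
--                 j += 1
--             v = int(string[i:j])
--             prod = v if prod is None else prod * v
--             i = j
--         else:
--             i += 1
--     return prod
-- ===== Notes on version B (the rewrite author's own statement) =====
-- stated objective: alternative
-- what changed: Replaces A's character-accumulator state machine plus separate product loop over a built list of numbers with a single cursor scan that consumes each maximal digit run in place and folds the product directly into a None-seeded accumulator, never materialising the list.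
import Mathlib
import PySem

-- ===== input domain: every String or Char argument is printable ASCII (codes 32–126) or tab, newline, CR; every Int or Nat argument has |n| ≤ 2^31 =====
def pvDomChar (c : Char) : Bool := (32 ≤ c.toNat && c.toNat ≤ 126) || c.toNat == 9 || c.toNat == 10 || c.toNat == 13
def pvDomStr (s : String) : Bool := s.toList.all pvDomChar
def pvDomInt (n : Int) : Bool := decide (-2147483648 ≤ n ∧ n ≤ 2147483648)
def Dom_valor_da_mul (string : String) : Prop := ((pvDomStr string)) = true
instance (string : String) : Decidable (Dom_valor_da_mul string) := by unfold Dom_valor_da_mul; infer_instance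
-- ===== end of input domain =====

-- B replaces A's accumulator state machine + product loop over a built list with one
-- cursor scan that consumes each digit run and folds the product into an Option accumulator.

-- int(run) on an accumulated digit run; on the ASCII domain the run is nonempty digits, so
-- int() cannot raise and the .getD 0 default is unreachable (both Pythons call int alike).
def pvInt (cs : List Char) : Int := (PySem.Int.ofChars? cs).getD 0

-- ===== PORT A =====
-- str.isnumeric is ported as PySem.Chars.isdigit: exact on the printable-ASCII domain.
def pvStepA (st : List Int × List Char) (c : Char) : List Int × List Char :=
  if PySem.Chars.isdigit c then (st.1, st.2 ++ [c])
  else if st.2 ≠ [] then (st.1 ++ [pvInt st.2], []) else (st.1, [])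

def pvFlushA (st : List Int × List Char) : List Int :=
  if st.2 ≠ [] then st.1 ++ [pvInt st.2] else st.1

def extrai_numeros (string : String) : List Int :=
  pvFlushA (string.toList.foldl pvStepA ([], []))

def valor_da_mul (string : String) : Option Int :=
  let numeros := extrai_numeros string
  if numeros.length = 0 then none
  else some (numeros.foldl (fun resultado valor => resultado * valor) 1)

-- ===== PORT B =====
-- the inner while-scan of a digit run and the slice string[i:j] are takeWhile/dropWhile
-- on the remaining characters; prod is the Option accumulator.
def pvGoB (cs : List Char) (acc : Option Int) : Option Int :=
  match cs with
  | [] => acc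
  | c :: rest =>
    if PySem.Chars.isdigit c then
      let v := pvInt (c :: rest.takeWhile PySem.Chars.isdigit)
      pvGoB (rest.dropWhile PySem.Chars.isdigit)
        (some (match acc with | none => v | some p => p * v))
    else pvGoB rest acc
termination_by cs.length
decreasing_by
  · exact Nat.lt_succ_of_le (List.length_dropWhile_le _ _)
  · simp

def valor_da_mul_alt (string : String) : Option Int := pvGoB string.toList none

-- ===== PRECONDITION & SPEC =====
def Spec_valor_da_mul (string : String) (out : Option Int) : Prop := out = valor_da_mul_alt string
instance (string : String) (out : Option Int) : Decidable (Spec_valor_da_mul string out) := by unfold Spec_valor_da_mul; infer_instance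

-- ===== CLAIM (what is proved, stated in full; the proofs are below) =====
def Claim_equal_valor_da_mul : Prop := ∀ (string : String), Dom_valor_da_mul string → Spec_valor_da_mul string (valor_da_mul string)

-- ===== LEMMAS AND PROOFS =====

-- the list of numbers described as run recursion
def pvExt : List Char → List Int
  | [] => []
  | c :: cs =>
    if PySem.Chars.isdigit c then
      pvInt (c :: cs.takeWhile PySem.Chars.isdigit) :: pvExt (cs.dropWhile PySem.Chars.isdigit)
    else pvExt cs
termination_by cs => cs.length
decreasing_by
  · exact Nat.lt_succ_of_le (List.length_dropWhile_le _ _)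
  · simp

lemma foldA_prefix (cs : List Char) (ns : List Int) (atual : List Char) :
    pvFlushA (cs.foldl pvStepA (ns, atual)) = ns ++ pvFlushA (cs.foldl pvStepA ([], atual)) := by
  induction cs generalizing ns atual with
  | nil => by_cases h : atual = [] <;> simp [pvFlushA, h]
  | cons c cs ih =>
    simp only [List.foldl_cons, pvStepA]
    by_cases hd : PySem.Chars.isdigit c
    · rw [if_pos hd, if_pos hd]
      exact ih ns (atual ++ [c])
    · rw [if_neg hd, if_neg hd]
      by_cases h : atual = []
      · simpa [h] using ih ns []
      · rw [if_pos (by simpa using h), if_pos (by simpa using h)]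
        simp only [List.nil_append]
        rw [ih (ns ++ [pvInt atual]) [], ih [pvInt atual] []]
        simp
lemma foldA_run (cs : List Char) (atual : List Char) (h : atual ≠ []) :
    pvFlushA (cs.foldl pvStepA ([], atual)) =
      pvInt (atual ++ cs.takeWhile PySem.Chars.isdigit) ::
        pvFlushA ((cs.dropWhile PySem.Chars.isdigit).foldl pvStepA ([], [])) := by
  induction cs generalizing atual with
  | nil => simp [pvFlushA, h]
  | cons c cs ih =>
    by_cases hd : PySem.Chars.isdigit c
    · simp only [List.foldl_cons, pvStepA, if_pos hd,
        List.takeWhile_cons_of_pos hd, List.dropWhile_cons_of_pos hd]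
      rw [ih (atual ++ [c]) (by simp)]
      simp
    · simp only [List.foldl_cons, pvStepA, if_neg hd,
        List.takeWhile_cons_of_neg hd, List.dropWhile_cons_of_neg hd,
        if_pos (show atual ≠ [] from h), List.append_nil]
      rw [foldA_prefix]
      simp
lemma extA_eq (cs : List Char) :
    pvFlushA (cs.foldl pvStepA ([], [])) = pvExt cs := by
  induction cs using pvExt.induct with
  | case1 => simp [pvExt, pvFlushA]
  | case2 c cs hd ih =>
    simp only [List.foldl_cons, pvStepA, if_pos hd, List.nil_append]
    rw [foldA_run cs [c] (by simp), ih, pvExt]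
    simp [hd]
  | case3 c cs hd ih =>
    simp only [List.foldl_cons, pvStepA, if_neg hd]
    rw [pvExt]
    have hd' : PySem.Chars.isdigit c = false := by simpa using hd
    simpa [hd'] using ih
lemma goB_foldl (cs : List Char) (acc : Option Int) :
    pvGoB cs acc =
      (pvExt cs).foldl (fun a v => some (match a with | none => v | some p => p * v)) acc := by
  induction cs, acc using pvGoB.induct with
  | case1 acc => simp [pvGoB, pvExt]
  | case2 acc c rest hd v ih =>
    rw [pvGoB, pvExt]
    simp only [if_pos hd, List.foldl_cons]
    exact ih
  | case3 acc c rest hd ih =>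
    rw [pvGoB, pvExt]
    simp only [if_neg hd]
    exact ih
lemma foldl_opt (vs : List Int) (p : Int) :
    vs.foldl (fun a v => some (match a with | none => v | some p => p * v)) (some p) =
      some (vs.foldl (· * ·) p) := by
  induction vs generalizing p with
  | nil => rfl
  | cons v vs ih => simpa using ih (p * v)

-- ===== VERDICT (by name: the statement is the Claim_ definition above) =====
theorem valor_da_mul_spec : Claim_equal_valor_da_mul := by
  intro string _
  unfold Spec_valor_da_mul valor_da_mul valor_da_mul_alt extrai_numeros
  rw [goB_foldl, extA_eq]
  cases h : pvExt string.toList with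
  | nil => simp
  | cons v vs =>
    simp only [List.length_cons, List.foldl_cons, one_mul, Nat.succ_ne_zero]
    rw [foldl_opt]
    simp
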